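-- pv_equiv track=rewrite | github.com/habvi/42_push_swap | python/main.py | set_block_num_range
-- ===== SOURCE A (Python) =====
-- def set_block_num_range(stack, head, total, nums_range_per_block, each_block_size, block_count):
--     new_tail = head - 1
--     for i in range(block_count):
--         new_head = new_tail + 1
--         new_tail = new_head + each_block_size - 1
--         if i < total % block_count:
--             new_tail += 1
--         if new_head > new_tail:
--             continue
--         stack.append((new_head, new_tail))
--         nums_range_per_block.append((new_head, new_tail))
--     return stack, nums_range_per_block
-- ===== SOURCE B (Python) =====
-- def set_block_num_range(stack, head, total, nums_range_per_block, each_block_size, block_count):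
--     # Note: like the original, mutates stack and nums_range_per_block in place.
--     if block_count > 0:
--         r = total % block_count
--         blocks = [b for b in
--                   ((head + i * each_block_size + min(i, r),
--                     head + (i + 1) * each_block_size + min(i + 1, r) - 1)
--                    for i in range(block_count))
--                   if b[0] <= b[1]]
--         stack.extend(blocks)
--         nums_range_per_block.extend(blocks)
--     return stack, nums_range_per_block
-- ===== Notes on version B (the rewrite author's own statement) =====
-- stated objective: alternative
-- what changed: Replaced the loop-carried new_tail accumulator with a closed-form computation of each block's bounds from its index i (head + i*size + min(i, total % block_count)), building the block list by map+filter and extending both output lists once.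
import Mathlib
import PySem

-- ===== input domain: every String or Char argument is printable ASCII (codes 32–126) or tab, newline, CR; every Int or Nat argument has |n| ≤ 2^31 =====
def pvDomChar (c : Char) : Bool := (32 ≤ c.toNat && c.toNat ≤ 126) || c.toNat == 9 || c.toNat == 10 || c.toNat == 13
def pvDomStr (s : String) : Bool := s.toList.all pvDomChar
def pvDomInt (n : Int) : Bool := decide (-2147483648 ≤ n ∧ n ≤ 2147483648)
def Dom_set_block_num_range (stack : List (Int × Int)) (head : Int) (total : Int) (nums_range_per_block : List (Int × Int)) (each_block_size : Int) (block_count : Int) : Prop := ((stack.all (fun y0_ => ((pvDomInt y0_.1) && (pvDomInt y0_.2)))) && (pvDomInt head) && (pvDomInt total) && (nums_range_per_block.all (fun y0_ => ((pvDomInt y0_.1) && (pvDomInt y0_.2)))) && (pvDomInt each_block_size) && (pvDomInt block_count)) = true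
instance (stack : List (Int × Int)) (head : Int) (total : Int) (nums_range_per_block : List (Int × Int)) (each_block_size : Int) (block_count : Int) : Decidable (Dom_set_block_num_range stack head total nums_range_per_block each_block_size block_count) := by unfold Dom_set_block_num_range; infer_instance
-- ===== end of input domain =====

-- B computes each block's bounds in closed form from its index instead of carrying new_tail
-- across iterations (objective: alternative decomposition, same cost). Python A and B both
-- mutate `stack` and `nums_range_per_block` in place identically; the claim is about the
-- returned value.

-- ===== PORT A =====
def set_block_num_range (stack : List (Int × Int)) (head : Int) (total : Int) (nums_range_per_block : List (Int × Int)) (each_block_size : Int) (block_count : Int) : (List (Int × Int)) × (List (Int × Int)) :=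
  let st := (PySem.List.pyRange 0 block_count 1).foldl
    (fun (st : Int × List (Int × Int) × List (Int × Int)) i =>
      let new_head := st.1 + 1
      let new_tail := new_head + each_block_size - 1
      let new_tail := if i < PySem.Int.mod total block_count then new_tail + 1 else new_tail
      if new_head > new_tail then (new_tail, st.2.1, st.2.2)
      else (new_tail, st.2.1 ++ [(new_head, new_tail)], st.2.2 ++ [(new_head, new_tail)]))
    (head - 1, stack, nums_range_per_block)
  (st.2.1, st.2.2)

-- ===== PORT B =====
def set_block_num_range_alt (stack : List (Int × Int)) (head : Int) (total : Int) (nums_range_per_block : List (Int × Int)) (each_block_size : Int) (block_count : Int) : (List (Int × Int)) × (List (Int × Int)) :=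
  if block_count > 0 then
    let r := PySem.Int.mod total block_count
    let blocks := ((PySem.List.pyRange 0 block_count 1).map
        (fun i => (head + i * each_block_size + min i r,
                   head + (i + 1) * each_block_size + min (i + 1) r - 1))).filter
        (fun b => b.1 ≤ b.2)
    (stack ++ blocks, nums_range_per_block ++ blocks)
  else (stack, nums_range_per_block)

-- ===== PRECONDITION & SPEC =====
def Spec_set_block_num_range (stack : List (Int × Int)) (head : Int) (total : Int) (nums_range_per_block : List (Int × Int)) (each_block_size : Int) (block_count : Int) (out : (List (Int × Int)) × (List (Int × Int))) : Prop := out = set_block_num_range_alt stack head total nums_range_per_block each_block_size block_count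
instance (stack : List (Int × Int)) (head : Int) (total : Int) (nums_range_per_block : List (Int × Int)) (each_block_size : Int) (block_count : Int) (out : (List (Int × Int)) × (List (Int × Int))) : Decidable (Spec_set_block_num_range stack head total nums_range_per_block each_block_size block_count out) := by unfold Spec_set_block_num_range; infer_instance

-- ===== CLAIM (what is proved, stated in full; the proofs are below) =====
def Claim_equal_set_block_num_range : Prop := ∀ (stack : List (Int × Int)) (head : Int) (total : Int) (nums_range_per_block : List (Int × Int)) (each_block_size : Int) (block_count : Int), Dom_set_block_num_range stack head total nums_range_per_block each_block_size block_count → Spec_set_block_num_range stack head total nums_range_per_block each_block_size block_count (set_block_num_range stack head total nums_range_per_block each_block_size block_count)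

-- ===== LEMMAS AND PROOFS =====

-- B's block list for the first k indices.
def pvBlocks (head e r : Int) (k : Int) : List (Int × Int) :=
  ((PySem.List.pyRange 0 k 1).map
      (fun i => (head + i * e + min i r, head + (i + 1) * e + min (i + 1) r - 1))).filter
    (fun b => b.1 ≤ b.2)

-- min (a+1) r in terms of min a r: the per-step remainder bump.
-- Loop invariant: after the first k iterations of A's loop, the carried tail equals
-- head - 1 + k*e + min k r and both accumulators have been extended by pvBlocks.
lemma pvLoopA_eq (total bc head e : Int) (hr : 0 ≤ PySem.Int.mod total bc)
    (k : Nat) (s0 n0 : List (Int × Int)) :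
    (PySem.List.pyRange 0 (k : Int) 1).foldl
      (fun (st : Int × List (Int × Int) × List (Int × Int)) i =>
        let new_head := st.1 + 1
        let new_tail := new_head + e - 1
        let new_tail := if i < PySem.Int.mod total bc then new_tail + 1 else new_tail
        if new_head > new_tail then (new_tail, st.2.1, st.2.2)
        else (new_tail, st.2.1 ++ [(new_head, new_tail)], st.2.2 ++ [(new_head, new_tail)]))
      (head - 1, s0, n0)
    = (head - 1 + k * e + min (k : Int) (PySem.Int.mod total bc),
       s0 ++ pvBlocks head e (PySem.Int.mod total bc) k,
       n0 ++ pvBlocks head e (PySem.Int.mod total bc) k) := by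
  induction k with
  | zero =>
    have h0 : PySem.List.pyRange 0 ((0:Nat):Int) 1 = [] :=
      PySem.List.pyRange_one_eq_nil (by norm_num)
    simp [pvBlocks]
    omega
  | succ k ih =>
    have hcast : ((k + 1 : Nat) : Int) = (k : Int) + 1 := by push_cast; ring
    have hsplit : PySem.List.pyRange 0 ((k : Int) + 1) 1
        = PySem.List.pyRange 0 (k : Int) 1 ++ [(k : Int)] :=
      PySem.List.pyRange_one_succ_right (by positivity)
    have hblk : pvBlocks head e (PySem.Int.mod total bc) ((k : Int) + 1)
        = pvBlocks head e (PySem.Int.mod total bc) (k : Int) ++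
          (if head + (k : Int) * e + min (k : Int) (PySem.Int.mod total bc) ≤
              head + ((k : Int) + 1) * e + min ((k : Int) + 1) (PySem.Int.mod total bc) - 1 then
            [(head + (k : Int) * e + min (k : Int) (PySem.Int.mod total bc),
              head + ((k : Int) + 1) * e + min ((k : Int) + 1) (PySem.Int.mod total bc) - 1)]
          else []) := by
      by_cases h : head + (k : Int) * e + min (k : Int) (PySem.Int.mod total bc) ≤
          head + ((k : Int) + 1) * e + min ((k : Int) + 1) (PySem.Int.mod total bc) - 1
      · simp [pvBlocks, hsplit, h]
      · simp [pvBlocks, hsplit, h]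
    rw [hcast, hsplit, List.foldl_append, ih, hblk]
    simp only [List.foldl_cons, List.foldl_nil]
    have hme : ((k : Int) + 1) * e = (k : Int) * e + e := by ring
    rw [hme]
    rcases lt_or_ge (k : Int) (PySem.Int.mod total bc) with hk | hk
    · rw [min_eq_left (by omega : (k : Int) ≤ PySem.Int.mod total bc),
        min_eq_left (by omega : (k : Int) + 1 ≤ PySem.Int.mod total bc),
        if_pos (show (k : Int) < PySem.Int.mod total bc from hk)]
      generalize (k : Int) * e = K
      split_ifs with ha hb hb
      · exfalso; omega
      · simp only [Prod.mk.injEq, List.append_nil]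
        exact ⟨by omega, trivial⟩
      · simp only [Prod.mk.injEq, List.append_assoc, List.append_right_inj, List.cons.injEq,
          and_true]
        refine ⟨by omega, ?_, ?_⟩ <;> omega
      · exfalso; omega
    · rw [min_eq_right (by omega : PySem.Int.mod total bc ≤ (k : Int)),
        min_eq_right (by omega : PySem.Int.mod total bc ≤ (k : Int) + 1),
        if_neg (show ¬ ((k : Int) < PySem.Int.mod total bc) by omega)]
      generalize (k : Int) * e = K
      split_ifs with ha hb hb
      · exfalso; omega
      · simp only [Prod.mk.injEq, List.append_nil]
        exact ⟨by omega, trivial⟩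
      · simp only [Prod.mk.injEq, List.append_assoc, List.append_right_inj, List.cons.injEq,
          and_true]
        refine ⟨by omega, ?_, ?_⟩ <;> omega
      · exfalso; omega

-- ===== VERDICT (by name: the statement is the Claim_ definition above) =====
theorem set_block_num_range_spec : Claim_equal_set_block_num_range := by
  intro stack head total nums e bc _
  unfold Spec_set_block_num_range set_block_num_range set_block_num_range_alt
  by_cases hbc : bc > 0
  · have hr : 0 ≤ PySem.Int.mod total bc := by
      rw [PySem.Int.mod_eq_emod_of_pos hbc]
      exact Int.emod_nonneg total (by omega)
    have hk : ((bc.toNat : Nat) : Int) = bc := Int.toNat_of_nonneg (by omega)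
    have hmain := pvLoopA_eq total bc head e hr bc.toNat stack nums
    rw [hk] at hmain
    simp only [hmain, hbc, if_pos, pvBlocks]
  · have h0 : PySem.List.pyRange 0 bc 1 = [] := PySem.List.pyRange_one_eq_nil (by omega)
    simp [h0, hbc]
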